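-- pv_equiv track=rewrite | github.com/trong-nguyen/stanford-algorithms-specialization | program-design-udacity/poker.py | kind_naive
-- ===== SOURCE A (Python) =====
-- def kind_naive(n, ranks):
--     """Return the first rank that this hand has exactly n of.
--     Return None if there is no n-of-a-kind in the hand."""
--     repetition = {}
--     for r in ranks:
--         repetition[r] = repetition.get(r, 0) + 1
--
--     for rank, rep in repetition.items():
--         if rep == n:
--             return rank
--
--     return None
-- ===== SOURCE B (Python) =====
-- def kind_naive(n, ranks):
--     """Return the first rank that this hand has exactly n of.
--     Return None if there is no n-of-a-kind in the hand."""
--     while ranks: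
--         r = ranks[0]
--         rest = [x for x in ranks if x != r]
--         if len(ranks) - len(rest) == n:
--             return r
--         ranks = rest
--     return None
-- ===== Notes on version B (the rewrite author's own statement) =====
-- stated objective: alternative
-- what changed: Replaced the build-a-frequency-dict-then-scan-it structure with successive elimination: repeatedly take the first remaining rank, obtain its multiplicity as the length drop after filtering it out, return it if the multiplicity is n, otherwise continue on the filtered remainder; no counter table and no count calls are used.
import Mathlib
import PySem

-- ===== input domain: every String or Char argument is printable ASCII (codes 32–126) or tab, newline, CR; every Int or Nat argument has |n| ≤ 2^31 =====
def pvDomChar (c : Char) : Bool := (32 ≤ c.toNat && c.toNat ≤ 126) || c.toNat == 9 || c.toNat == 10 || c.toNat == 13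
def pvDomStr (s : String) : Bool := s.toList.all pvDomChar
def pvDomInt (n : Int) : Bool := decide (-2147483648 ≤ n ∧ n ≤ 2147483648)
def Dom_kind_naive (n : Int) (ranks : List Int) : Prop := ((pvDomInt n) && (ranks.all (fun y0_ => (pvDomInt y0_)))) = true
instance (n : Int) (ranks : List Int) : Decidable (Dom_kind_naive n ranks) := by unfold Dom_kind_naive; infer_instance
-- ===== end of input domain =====

-- B replaces A's frequency-dict-then-scan with successive elimination: take the first remaining
-- rank, measure its multiplicity as the length drop after filtering it out, return it on a match,
-- else continue on the remainder (alternative algorithm, no counter table; slower on large inputs).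


-- ===== PORT A =====
-- for r in ranks: repetition[r] = repetition.get(r, 0) + 1; then scan items for rep == n
def kind_naive (n : Int) (ranks : List Int) : Option Int :=
  let repetition : PySem.Dict Int Int :=
    ranks.foldl (fun d r => d.insert r (d.getD r 0 + 1)) PySem.Dict.empty
  (repetition.items.find? (fun p => p.2 == n)).map (fun p => p.1)

-- ===== PORT B =====
-- while ranks: r = ranks[0]; rest = [x for x in ranks if x != r];
-- if len(ranks) - len(rest) == n: return r; ranks = rest  -- the while loop as structural recursion
def kind_naive_alt (n : Int) (ranks : List Int) : Option Int :=
  match ranks with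
  | [] => none
  | r :: tl =>
    let rest := (r :: tl).filter (fun x => x != r)
    if ((r :: tl).length : Int) - (rest.length : Int) = n then some r
    else kind_naive_alt n rest
termination_by ranks.length
decreasing_by
  simp only [List.filter_cons, bne_self_eq_false, List.length_cons]
  exact Nat.lt_succ_of_le (List.length_filter_le _ _)

-- ===== PRECONDITION & SPEC =====
def Spec_kind_naive (n : Int) (ranks : List Int) (out : Option Int) : Prop := out = kind_naive_alt n ranks
instance (n : Int) (ranks : List Int) (out : Option Int) : Decidable (Spec_kind_naive n ranks out) := by unfold Spec_kind_naive; infer_instance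

-- ===== CLAIM (what is proved, stated in full; the proofs are below) =====
def Claim_equal_kind_naive : Prop := ∀ (n : Int) (ranks : List Int), Dom_kind_naive n ranks → Spec_kind_naive n ranks (kind_naive n ranks)

-- ===== LEMMAS AND PROOFS =====

-- find? over the ordered dedup (first appearances) finds the same first witness as find? over the list
theorem find?_ofList (p : Int → Bool) (xs : List Int) :
    (PySem.Set.ofList xs : List Int).find? p = xs.find? p := by
  induction xs using List.reverseRecOn with
  | nil => rfl
  | append_singleton ys x ih =>
    have h1 : (PySem.Set.ofList (ys ++ [x]) : List Int)
        = PySem.Set.add (PySem.Set.ofList ys) x := by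
      rw [PySem.Set.ofList_append, PySem.Set.update_cons, PySem.Set.update_nil]
    by_cases hx : x ∈ (PySem.Set.ofList ys : List Int)
    · rw [h1, PySem.Set.add_of_mem hx, ih, List.find?_append]
      have hxs : x ∈ ys := (PySem.Set.mem_ofList ys x).1 hx
      cases hfind : ys.find? p with
      | some v => rfl
      | none =>
        have hpx : p x = false := by
          have := List.find?_eq_none.1 hfind x hxs
          simpa using this
        simp [List.find?, hpx]
    · rw [h1, PySem.Set.add_of_not_mem hx, List.find?_append, List.find?_append, ih]

-- A's port equals the first-element scan with the whole-list count predicate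
theorem kind_naive_eq_find (n : Int) (ranks : List Int) :
    kind_naive n ranks = ranks.find? (fun r => ((ranks.count r : Int) == n)) := by
  unfold kind_naive
  simp only [PySem.Dict.foldl_insert_getD_add_one_eq_counter, PySem.Dict.items_counter,
    List.find?_map, Option.map_map]
  have hcomp : ((fun p : Int × Int => p.2 == n) ∘ fun k => (k, (List.count k ranks : Int)))
      = fun r => ((List.count r ranks : Int) == n) := rfl
  rw [hcomp, find?_ofList]
  have : (fun r => ((List.count r ranks : Int) == n)) = fun r => ((ranks.count r : Int) == n) := rfl
  rw [this]
  cases h : ranks.find? (fun r => ((ranks.count r : Int) == n)) <;> simp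

-- dropping elements that can never satisfy p does not change the first witness
theorem find?_filter_of_imp {α : Type} (p q : α → Bool) (l : List α)
    (h : ∀ x ∈ l, p x = true → q x = true) : l.find? p = (l.filter q).find? p := by
  induction l with
  | nil => rfl
  | cons a tl ih =>
    have ih' := ih (fun x hx => h x (List.mem_cons_of_mem a hx))
    by_cases hq : q a = true
    · cases hp : p a <;> simp [List.find?, hq, hp, ih']
    · have hp : p a = false := by
        cases hpa : p a
        · rfl
        · exact absurd (h a (List.mem_cons_self) hpa) (by simpa using hq)
      simp [List.find?, hq, hp, ih']

-- pointwise-equal predicates on the members give the same find?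
theorem find?_congr_mem {α : Type} (p q : α → Bool) (l : List α)
    (h : ∀ x ∈ l, p x = q x) : l.find? p = l.find? q := by
  induction l with
  | nil => rfl
  | cons a tl ih =>
    have ha := h a List.mem_cons_self
    cases hp : p a <;>
      simp [List.find?, hp, ← ha, ih (fun x hx => h x (List.mem_cons_of_mem a hx))]

-- multiplicity of r = length drop caused by filtering r out
theorem count_add_filter_len (r : Int) (l : List Int) :
    l.count r + (l.filter (fun x => x != r)).length = l.length := by
  induction l with
  | nil => rfl
  | cons a tl ih =>
    by_cases ha : a = r
    · subst ha; simp; omega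
    · simp [ha, bne_iff_ne]; omega

-- B's port equals the same first-element scan
theorem kind_naive_alt_eq_find (n : Int) (ranks : List Int) :
    kind_naive_alt n ranks = ranks.find? (fun r => ((ranks.count r : Int) == n)) := by
  fun_induction kind_naive_alt n ranks with
  | case1 => rfl
  | case2 r tl rest hcond => -- the count of r matches n: both return some r
    have hcond' : ((r :: tl).length : Int)
        - ((List.filter (fun x => x != r) (r :: tl)).length : Int) = n := hcond
    have hlen := count_add_filter_len r (r :: tl)
    have hr' : ((List.count r tl : Int) + 1) = n := by
      simp only [List.count_cons_self] at hlen; omega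
    simp [List.find?, hr']
  | case3 r tl rest hcond ih =>
    have hcond' : ¬ (((r :: tl).length : Int)
        - ((List.filter (fun x => x != r) (r :: tl)).length : Int) = n) := hcond
    have hlen := count_add_filter_len r (r :: tl)
    have hr : ((r :: tl).count r : Int) ≠ n := by
      intro h
      exact hcond' (by omega)
    have hrest : rest = tl.filter (fun x => x != r) := by
      simp only [rest, List.filter_cons, bne_self_eq_false, Bool.false_eq_true, if_false]
    have hb : ((((r :: tl).count r : Int)) == n) = false := by simpa using hr
    rw [List.find?_cons_of_neg (by simpa using hr)]
    -- restrict the scan of tl to the elements ≠ r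
    rw [find?_filter_of_imp (fun x => (((r :: tl).count x : Int) == n)) (fun x => x != r) tl]
    · rw [← hrest, ih]
      apply find?_congr_mem
      intro x hx
      have hxr : x ≠ r := by
        rw [hrest] at hx
        simpa [bne_iff_ne] using (List.of_mem_filter hx)
      have hcnt : (r :: tl).count x = rest.count x := by
        rw [hrest, List.count_filter (by simp only [bne_iff_ne, ne_eq]; exact hxr)]
        simp [Ne.symm hxr]
      rw [hcnt]
    · intro x hx hp
      by_cases hxr : x = r
      · subst hxr; rw [hp] at hb; cases hb
      · simpa [bne_iff_ne] using hxr

-- ===== VERDICT (by name: the statement is the Claim_ definition above) =====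
theorem kind_naive_spec : Claim_equal_kind_naive := by
  intro n ranks _
  unfold Spec_kind_naive
  rw [kind_naive_eq_find, kind_naive_alt_eq_find]
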